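-- pv_equiv track=rewrite | github.com/edizucar/adversarially-training-transformers | src/ProbeIntervention.py | __compute_probe_targets_quotes
-- ===== SOURCE A (Python) =====
-- from typing import Dict, List, NamedTuple, Callable
--
-- def __compute_probe_targets_quotes(token_batches : List[List[str]]):
--     """
--     Takes:
--         - tokens_batches : List[str, "batch_size seq"] - a list of tokens (as strings), length batch_size
--
--     Returns
--         - all_targets : List[int, "batch_size seq"] - a list that has a 1 if the current token position is in a quote, and a 0 otherwise.
--
--     """
--
--     all_targets = []
--     for tokens in token_batches:
--         targets = []
--         inside_quote = False
--         for i, token in enumerate(tokens):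
--             if i == 0 and token[0] == '"':
--                 # Question: is it a reasonable assumption that a lack a whitespace after a quotation mark implies you are inside a quote?
--
--                 # we don't know if it is a start/end quote so just ignore it
--                 continue
--             if '"' in token:
--                 if token[0] == '"':
--                     # quote is at beginning of token so check previous token
--                     is_start_quote = tokens[i-1][-1] in [' ', '\n', '\t']
--                 else:
--                     quote_index = token.index('"')
--                     is_start_quote = token[quote_index-1] in [' ', '\n', '\t']
--                 if is_start_quote:
--                     targets.extend([0] * (i - len(targets)))
--                 else:
--                     targets.extend([1] * ((i+1) - len(targets)))
--                 inside_quote = is_start_quote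
--         # Handle trailing tokens after the last quote
--         targets.extend([int(inside_quote)] * (len(tokens) - len(targets)))
--         all_targets.append(targets)
--     return all_targets
-- ===== SOURCE B (Python) =====
-- def _quote_events(tokens):
--     # (boundary, is_start) per counted quote token: boundary = i for a start
--     # quote (positions < i are outside), i + 1 for an end quote (< i+1 inside).
--     events = []
--     for i, token in enumerate(tokens):
--         if '"' in token and not (i == 0 and token.startswith('"')):
--             if token.startswith('"'):
--                 prev_char = tokens[i - 1][-1]
--             else:
--                 prev_char = token[token.index('"') - 1]
--             is_start = prev_char in ' \n\t'
--             events.append((i if is_start else i + 1, is_start))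
--     return events
--
--
-- def _batch_targets(tokens):
--     events = _quote_events(tokens)
--     tail = int(events[-1][1]) if events else 0
--     return [next((0 if s else 1 for b, s in events if b > p), tail)
--             for p in range(len(tokens))]
--
--
-- def __compute_probe_targets_quotes(token_batches):
--     return [_batch_targets(tokens) for tokens in token_batches]
-- ===== Notes on version B (the rewrite author's own statement) =====
-- stated objective: alternative
-- what changed: A interleaves quote classification with segment-filling of one growing targets list in a single stateful loop; B first collects stateless (boundary, is_start) quote events with a filterMap-style scan, then computes each position independently as the value of the first event whose boundary exceeds it, defaulting to the last event's flag.
import Mathlib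
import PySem

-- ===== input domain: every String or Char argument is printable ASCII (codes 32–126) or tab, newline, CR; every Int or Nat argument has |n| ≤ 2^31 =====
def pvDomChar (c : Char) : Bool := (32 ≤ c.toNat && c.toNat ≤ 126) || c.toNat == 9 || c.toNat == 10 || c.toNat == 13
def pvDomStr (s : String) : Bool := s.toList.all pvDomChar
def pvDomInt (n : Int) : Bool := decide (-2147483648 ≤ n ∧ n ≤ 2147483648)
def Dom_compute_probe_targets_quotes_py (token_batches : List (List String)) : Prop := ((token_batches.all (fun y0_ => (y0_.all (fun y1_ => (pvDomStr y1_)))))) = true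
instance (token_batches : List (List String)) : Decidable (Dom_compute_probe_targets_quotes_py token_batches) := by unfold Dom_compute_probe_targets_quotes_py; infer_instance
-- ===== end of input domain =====

-- B replaces A's interleaved classify-and-segment-fill loop by a stateless filterMap that
-- collects (boundary, is_start) quote events, then a per-position first-event lookup
-- (alternative decomposition, same cost). Pre_ excludes A's raising inputs
-- (on an empty first token A raises IndexError where B, which skips quoteless tokens, returns).


-- ===== PORT A =====
-- one body of A's inner loop; state = (targets, inside_quote)
def pvA_step (tokens : List String) (st : List Int × Bool) (it : Int × String) : List Int × Bool :=
  let i := it.1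
  let token := it.2
  if i = 0 ∧ token.toList.headD ' ' = '"' then st     -- token[0] raises on "" : excluded by Pre_
  else if token.toList.contains '"' then
    let is_start : Bool :=
      if token.toList.headD ' ' = '"' then
        decide (((PySem.List.pyGetD tokens (i - 1) "").toList.getLastD ' ') ∈ ([' ', '\n', '\t'] : List Char))
      else
        let qi := (PySem.List.index? token.toList '"').getD 0
        decide ((token.toList.getD (qi - 1) ' ') ∈ ([' ', '\n', '\t'] : List Char))
    if is_start then (st.1 ++ List.replicate (i - (st.1.length : Int)).toNat 0, true)
    else (st.1 ++ List.replicate ((i + 1) - (st.1.length : Int)).toNat 1, false)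
  else st

def pvA_batch (tokens : List String) : List Int :=
  let st := (PySem.List.enumerate tokens).foldl (pvA_step tokens) ([], false)
  st.1 ++ List.replicate (((tokens.length : Int)) - (st.1.length : Int)).toNat (if st.2 then 1 else 0)

def compute_probe_targets_quotes_py (token_batches : List (List String)) : List (List Int) :=
  token_batches.foldl (fun acc tokens => acc ++ [pvA_batch tokens]) []

-- ===== PORT B =====
-- _quote_events' per-token classification: none if the token bears no counted quote,
-- otherwise some (boundary, is_start)
def pvB_classify (tokens : List String) (i : Int) (token : String) : Option (Int × Bool) :=
  if PySem.Str.isIn "\"" token ∧ ¬ (i = 0 ∧ PySem.Str.startswith token "\"") then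
    let prev_char : Char :=
      if PySem.Str.startswith token "\"" then
        (PySem.List.pyGetD tokens (i - 1) "").toList.getLastD ' '   -- tokens[i-1][-1] raises on "" : excluded by Pre_
      else
        token.toList.getD (((PySem.List.index? token.toList '"').getD 0) - 1) ' '
    let is_start := decide (prev_char ∈ " \n\t".toList)
    some (if is_start then i else i + 1, is_start)
  else none

def pvB_events (tokens : List String) : List (Int × Bool) :=
  (PySem.List.enumerate tokens).filterMap (fun it => pvB_classify tokens it.1 it.2)

def pvB_batch (tokens : List String) : List Int :=
  let events := pvB_events tokens
  let tail : Int := match events.getLast? with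
    | some e => if e.2 then 1 else 0
    | none => 0
  (PySem.List.pyRange 0 (tokens.length : Int) 1).map (fun p =>
    match events.find? (fun e => decide (p < e.1)) with
    | some e => if e.2 then 0 else 1
    | none => tail)

def compute_probe_targets_quotes_py_alt (token_batches : List (List String)) : List (List Int) :=
  token_batches.map pvB_batch

-- ===== PRECONDITION & SPEC =====
-- Pre_ excludes exactly the inputs where A raises IndexError: a batch whose first token is the
-- empty string (token[0] at i == 0), or a token starting with '"' whose previous token is empty
-- (tokens[i-1][-1]).
def Pre_compute_probe_targets_quotes_py (token_batches : List (List String)) : Prop :=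
  ∀ tokens ∈ token_batches,
    (tokens.getD 0 "x").toList ≠ [] ∧
    ∀ i < tokens.length, 1 ≤ i → (tokens.getD i "").toList.headD ' ' = '"' →
      (tokens.getD (i - 1) "").toList ≠ []
instance (token_batches : List (List String)) : Decidable (Pre_compute_probe_targets_quotes_py token_batches) := by unfold Pre_compute_probe_targets_quotes_py; infer_instance

def pvWitness_compute_probe_targets_quotes_py : List (List String) :=
  [["He", " said", " \"hi", " there\"", " ok"], []]

def Spec_compute_probe_targets_quotes_py (token_batches : List (List String)) (out : List (List Int)) : Prop := out = compute_probe_targets_quotes_py_alt token_batches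
instance (token_batches : List (List String)) (out : List (List Int)) : Decidable (Spec_compute_probe_targets_quotes_py token_batches out) := by unfold Spec_compute_probe_targets_quotes_py; infer_instance

-- ===== CLAIM (what is proved, stated in full; the proofs are below) =====
def Claim_equal_compute_probe_targets_quotes_py : Prop := ∀ (token_batches : List (List String)), Dom_compute_probe_targets_quotes_py token_batches → Pre_compute_probe_targets_quotes_py token_batches → Spec_compute_probe_targets_quotes_py token_batches (compute_probe_targets_quotes_py token_batches)

-- ===== LEMMAS AND PROOFS =====

-- boolean event value / tail flag of B's events, as used by A's integer state
def pvEvVal (e : Int × Bool) : Int × Int := (e.1, if e.2 then 0 else 1)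

def pvLastFlag (ev : List (Int × Bool)) : Bool :=
  match ev.getLast? with
  | some e => e.2
  | none => false

-- A's targets list as a left fold of segment fills over the events
def pvFill (t : List Int) (es : List (Int × Int)) : List Int :=
  es.foldl (fun t e => t ++ List.replicate (e.1 - (t.length : Int)).toNat e.2) t

-- the "first event with boundary > p" suffix (proof-only helper)
def pvB_skip (p : Int) : List (Int × Int) → List (Int × Int)
  | [] => []
  | e :: rest => if e.1 ≤ p then pvB_skip p rest else e :: rest

lemma pv_start_head (s : List Char) : PySem.Chars.startswith s ['"'] = (s.headD ' ' == '"') := by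
  cases s with
  | nil => decide
  | cons a t => simp [PySem.Chars.startswith, List.isPrefixOf, eq_comm]

lemma pv_isin (s : List Char) : PySem.Chars.isIn ['"'] s = s.contains '"' := by
  cases h : s.contains '"' with
  | true =>
    rw [PySem.Chars.isIn_iff_infix]
    exact (List.singleton_infix_iff _ _).mpr (by simpa using h)
  | false =>
    rw [PySem.Chars.isIn_eq_false_iff]
    intro hh
    rw [List.singleton_infix_iff] at hh
    simp_all

lemma pvFill_cons (t : List Int) (e : Int × Int) (es : List (Int × Int)) :
    pvFill t (e :: es) = pvFill (t ++ List.replicate (e.1 - (t.length : Int)).toNat e.2) es := rfl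

lemma pv_step_rel (tokens : List String) (ev : List (Int × Bool)) (it : Int × String) :
    pvA_step tokens (pvFill [] (ev.map pvEvVal), pvLastFlag ev) it =
      (pvFill [] ((ev ++ (pvB_classify tokens it.1 it.2).toList).map pvEvVal),
       pvLastFlag (ev ++ (pvB_classify tokens it.1 it.2).toList)) := by
  unfold pvA_step pvB_classify
  simp only [PySem.Str.startswith_eq, PySem.Str.isIn_eq,
    show ("\"".toList = ['"']) from rfl, pv_start_head, pv_isin, beq_iff_eq]
  split_ifs with h1 h2 h3 h4 <;>
    simp_all [pvFill, pvEvVal, pvLastFlag, List.foldl_append,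
      show (" \n\t".toList = [' ', '\n', '\t']) from rfl]

lemma pv_pass1 (tokens : List String) :
    ∀ (l : List (Int × String)) (ev : List (Int × Bool)),
      l.foldl (pvA_step tokens) (pvFill [] (ev.map pvEvVal), pvLastFlag ev)
        = (pvFill [] ((ev ++ l.filterMap (fun it => pvB_classify tokens it.1 it.2)).map pvEvVal),
           pvLastFlag (ev ++ l.filterMap (fun it => pvB_classify tokens it.1 it.2))) := by
  intro l
  induction l with
  | nil => intro ev; simp
  | cons it l ih =>
    intro ev
    simp only [List.foldl_cons, pv_step_rel]
    rw [ih (ev ++ (pvB_classify tokens it.1 it.2).toList)]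
    cases h : pvB_classify tokens it.1 it.2 <;> simp [h, List.filterMap_cons]

lemma pv_skip_nil (p : Int) :
    ∀ l : List (Int × Int), pvB_skip p l = [] → ∀ e ∈ l, e.1 ≤ p := by
  intro l
  induction l with
  | nil => simp
  | cons e rest ih =>
    intro h
    by_cases hb : e.1 ≤ p
    · simp only [pvB_skip, if_pos hb] at h
      intro f hf
      rcases List.mem_cons.mp hf with rfl | hf
      · exact hb
      · exact ih h f hf
    · simp [pvB_skip, hb] at h

lemma pv_find_skip (p t : Int) :
    ∀ l : List (Int × Bool),
      (match l.find? (fun e => decide (p < e.1)) with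
        | some e => if e.2 then (0 : Int) else 1
        | none => t)
      = (match pvB_skip p (l.map pvEvVal) with | [] => t | e :: _ => e.2) := by
  intro l
  induction l with
  | nil => rfl
  | cons e rest ih =>
    by_cases hb : p < e.1
    · simp [List.find?_cons, hb, pvB_skip, pvEvVal, not_le.mpr hb]
    · simp only [List.map_cons, pvB_skip, pvEvVal, if_pos (not_lt.mp hb)]
      rw [← ih]
      simp [List.find?_cons, hb]

lemma pv_fill_get_lt (es : List (Int × Int)) :
    ∀ (t : List Int) (p : Nat), p < t.length → (pvFill t es)[p]? = t[p]? := by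
  induction es with
  | nil => intro t p _; rfl
  | cons e es ih =>
    intro t p hp
    rw [pvFill_cons, ih _ p (by simp; omega)]
    exact List.getElem?_append_left hp

lemma pv_fill_get_ge (es : List (Int × Int)) :
    ∀ (t : List Int) (p : Nat), t.length ≤ p →
      (pvFill t es)[p]? = (match pvB_skip (p : Int) es with | [] => none | e :: _ => some e.2) := by
  induction es with
  | nil =>
    intro t p hp
    simp [pvFill, pvB_skip, List.getElem?_eq_none hp]
  | cons e es ih =>
    intro t p hp
    by_cases hb : e.1 ≤ (p : Int)
    · rw [pvFill_cons, ih _ p (by simp; omega)]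
      simp [pvB_skip, hb]
    · rw [pvFill_cons, pv_fill_get_lt es _ p (by simp; omega)]
      rw [List.getElem?_append_right hp]
      simp only [pvB_skip, if_neg hb]
      rw [List.getElem?_replicate]
      simp only [if_pos (by omega : p - t.length < (e.1 - (t.length : Int)).toNat)]

lemma pv_fill_len (n : Int) :
    ∀ (es : List (Int × Int)) (t : List Int), (∀ e ∈ es, e.1 ≤ n) → (t.length : Int) ≤ n →
      ((pvFill t es).length : Int) ≤ n := by
  intro es
  induction es with
  | nil => intro t _ h; simpa [pvFill] using h
  | cons e es ih =>
    intro t hb ht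
    rw [pvFill_cons]
    refine ih _ (fun f hf => hb f (List.mem_cons_of_mem _ hf)) ?_
    have := hb e (List.mem_cons_self ..)
    simp; omega

lemma pv_classify_bound (tokens : List String) (i : Int) (token : String) (e : Int × Bool) :
    pvB_classify tokens i token = some e → e.1 ≤ i + 1 := by
  unfold pvB_classify
  intro he
  split_ifs at he
  all_goals first
    | exact Option.noConfusion he
    | (injection he with h'; subst h'; simp only; split_ifs <;> omega)

lemma pv_events_bound (tokens : List String) :
    ∀ e ∈ pvB_events tokens, e.1 ≤ (tokens.length : Int) := by
  intro e he
  unfold pvB_events at he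
  rcases List.mem_filterMap.mp he with ⟨it, hit, hcl⟩
  rcases (PySem.List.mem_enumerate_iff _ _ _).mp hit with ⟨k, hk, rfl⟩
  have := pv_classify_bound tokens _ _ _ hcl
  simp only at this
  omega

lemma pv_batch_eq (tokens : List String) : pvA_batch tokens = pvB_batch tokens := by
  unfold pvA_batch pvB_batch
  dsimp only
  have h1 : (PySem.List.enumerate tokens).foldl (pvA_step tokens) ([], false)
      = (pvFill [] ((pvB_events tokens).map pvEvVal), pvLastFlag (pvB_events tokens)) := by
    have := pv_pass1 tokens (PySem.List.enumerate tokens) []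
    simpa [pvFill, pvLastFlag, pvB_events] using this
  rw [h1]
  set ev := pvB_events tokens with hev
  set EV := ev.map pvEvVal with hEV
  set F := pvFill [] EV with hF
  have htail : (match ev.getLast? with
      | some e => if e.2 then (1 : Int) else 0
      | none => 0) = (if pvLastFlag ev then (1 : Int) else 0) := by
    unfold pvLastFlag
    cases ev.getLast? <;> simp
  set tail : Int := if pvLastFlag ev then 1 else 0 with htl
  have hbnd : ∀ e ∈ EV, e.1 ≤ (tokens.length : Int) := by
    intro e he
    rcases List.mem_map.mp he with ⟨f, hf, rfl⟩
    exact pv_events_bound tokens f hf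
  have hFlen : F.length ≤ tokens.length := by
    have := pv_fill_len (tokens.length : Int) EV [] hbnd (by simp)
    rw [← hF] at this; exact_mod_cast this
  rw [htail]
  apply List.ext_getElem?
  intro p
  rw [List.getElem?_map, PySem.List.getElem?_pyRange_one]
  by_cases hp : p < tokens.length
  · rw [if_pos (show p < (((tokens.length : Int)) - 0).toNat by omega)]
    simp only [Option.map_some, zero_add]
    rw [pv_find_skip (p : Int) tail ev, ← hEV]
    rcases hrem : pvB_skip (p : Int) EV with _ | ⟨e, rest⟩
    · have hle : (F.length : Int) ≤ (p : Int) :=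
        pv_fill_len (p : Int) EV [] (pv_skip_nil _ _ hrem) (by simp)
      have hle' : F.length ≤ p := by exact_mod_cast hle
      rw [List.getElem?_append_right hle', List.getElem?_replicate]
      rw [if_pos (by omega)]
    · have hget : F[p]? = some e.2 := by
        have := pv_fill_get_ge EV [] p (by simp)
        rw [← hF, hrem] at this; exact this
      have hlt : p < F.length := by
        by_contra hcon
        rw [List.getElem?_eq_none (by omega)] at hget
        simp at hget
      rw [List.getElem?_append_left hlt, hget]
  · rw [if_neg (show ¬ p < (((tokens.length : Int)) - 0).toNat by omega)]
    rw [List.getElem?_eq_none (by simp; omega)]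
    simp

-- ===== VERDICT (by name: the statement is the Claim_ definition above) =====
theorem compute_probe_targets_quotes_py_spec : Claim_equal_compute_probe_targets_quotes_py := by
  intro tb _ _
  unfold Spec_compute_probe_targets_quotes_py compute_probe_targets_quotes_py compute_probe_targets_quotes_py_alt
  rw [PySem.List.foldl_append_singleton_eq_map]
  simp [pv_batch_eq]
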